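-- pv_equiv track=rewrite | github.com/serdardoruk/Amazon-Online-Assessment-Python-Solutions | Questions/SubstringsOfSizeKWithKDistinctChars.py | substringK
-- ===== SOURCE A (Python) =====
-- def substringK(s, k):
-- 	if not s or k == 0:
-- 		return []
-- 	letter = {}
-- 	res = set()
-- 	start = 0
-- 	for i in range(len(s)):
-- 		if s[i] in letter and letter[s[i]] >= start:
-- 			start = letter[s[i]] + 1
-- 		letter[s[i]] = i
-- 		if i - start + 1 == k:
-- 			res.add(s[start : i + 1])
-- 			start += 1
-- 	return list(res)
-- ===== SOURCE B (Python) =====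
-- def substringK(s, k):
-- 	if not s or k == 0:
-- 		return []
-- 	res = set()
-- 	for i in range(len(s)):
-- 		sub = s[i : i + k]
-- 		if len(sub) == k and len(set(sub)) == k:
-- 			res.add(sub)
-- 	return list(res)
-- ===== Notes on version B (the rewrite author's own statement) =====
-- stated objective: simpler
-- what changed: Replaces the incremental last-seen-index sliding window (dict of last occurrences plus a moving start pointer) with a direct scan that independently checks each candidate slice s[i:i+k] for length k and k distinct characters, adding it to the result set.
import Mathlib
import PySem

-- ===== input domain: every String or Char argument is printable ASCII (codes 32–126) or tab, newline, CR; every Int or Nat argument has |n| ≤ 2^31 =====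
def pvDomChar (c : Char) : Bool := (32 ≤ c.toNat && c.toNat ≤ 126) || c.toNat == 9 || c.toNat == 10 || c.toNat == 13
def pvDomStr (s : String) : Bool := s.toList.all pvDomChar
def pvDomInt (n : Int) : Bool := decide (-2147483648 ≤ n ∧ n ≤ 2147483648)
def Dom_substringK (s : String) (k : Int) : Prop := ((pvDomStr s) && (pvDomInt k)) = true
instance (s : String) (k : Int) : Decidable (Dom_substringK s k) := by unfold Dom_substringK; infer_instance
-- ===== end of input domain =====

-- B replaces A's last-seen-index sliding window with a direct per-slice distinctness check (simpler, not faster).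

-- ===== PORT A =====
-- loop body of A, extracted as a helper; s[i] is in range since i ∈ range(len(s)), hence the total getD
def pvStepA (s : String) (k : Int)
    (st : PySem.Dict Char Int × PySem.Set String × Int) (i : Int) :
    PySem.Dict Char Int × PySem.Set String × Int :=
  let letter := st.1
  let res := st.2.1
  let start := st.2.2
  let c := (PySem.Str.pyGet? s i).getD ' '
  let start :=
    match letter.get? c with          -- 'if s[i] in letter and letter[s[i]] >= start'
    | some j => if start ≤ j then j + 1 else start
    | none => start
  let letter := letter.insert c i
  if i - start + 1 = k then
    (letter, PySem.Set.add res (PySem.Str.slice s (some start) (some (i + 1))), start + 1)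
  else
    (letter, res, start)

def substringK (s : String) (k : Int) : List String :=
  if s.toList.length = 0 ∨ k = 0 then []
  else
    ((PySem.List.pyRange 0 (s.toList.length : Int) 1).foldl (pvStepA s k)
      (PySem.Dict.empty, PySem.Set.empty, 0)).2.1

-- ===== PORT B =====
-- loop body of B: add s[i:i+k] when it has length k and k distinct characters
def pvStepB (s : String) (k : Int) (res : PySem.Set String) (i : Int) : PySem.Set String :=
  let sub := PySem.Str.slice s (some i) (some (i + k))
  if (sub.toList.length : Int) = k ∧ ((PySem.Set.ofList sub.toList).length : Int) = k then
    PySem.Set.add res sub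
  else res

def substringK_alt (s : String) (k : Int) : List String :=
  if s.toList.length = 0 ∨ k = 0 then []
  else
    (PySem.List.pyRange 0 (s.toList.length : Int) 1).foldl (pvStepB s k) PySem.Set.empty

-- ===== PRECONDITION & SPEC =====
def Spec_substringK (s : String) (k : Int) (out : List String) : Prop := out = substringK_alt s k
instance (s : String) (k : Int) (out : List String) : Decidable (Spec_substringK s k out) := by unfold Spec_substringK; infer_instance

-- ===== CLAIM (what is proved, stated in full; the proofs are below) =====
def Claim_equal_substringK : Prop := ∀ (s : String) (k : Int), Dom_substringK s k → Spec_substringK s k (substringK s k)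

-- ===== LEMMAS AND PROOFS =====

-- last index j < p with cs.getD j ' ' = c (what A's 'letter' dict holds)
def pvOcc (cs : List Char) (c : Char) : Nat → Option Nat
  | 0 => none
  | p + 1 => if cs.getD p ' ' = c then some p else pvOcc cs c p

-- minimal start of a duplicate-free window ending just before p
def pvM (cs : List Char) : Nat → Nat
  | 0 => 0
  | p + 1 =>
    max (pvM cs p)
      (match pvOcc cs (cs.getD p ' ') p with
       | some j => j + 1
       | none => 0)

-- A's 'letter' dict after p iterations
def pvLetter (cs : List Char) : Nat → PySem.Dict Char Int
  | 0 => PySem.Dict.empty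
  | p + 1 => (pvLetter cs p).insert (cs.getD p ' ') (p : Int)

-- the strings A has added after p iterations, in insertion order
def pvAdds (s : String) (k : Int) (p : Nat) : List String :=
  (List.range p).filterMap (fun q =>
    if pvM s.toList (q + 1) + k.toNat ≤ q + 1 then
      some (PySem.Str.slice s (some ((q : Int) + 1 - k)) (some ((q : Int) + 1)))
    else none)

-- the strings B has added after p iterations, in insertion order
def pvBAdds (s : String) (k : Int) (p : Nat) : List String :=
  (List.range p).filterMap (fun i =>
    if i + k.toNat ≤ s.toList.length ∧ ((s.toList.drop i).take k.toNat).Nodup then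
      some (PySem.Str.slice s (some (i : Int)) (some ((i : Int) + k)))
    else none)

theorem pvOcc_eq_none (cs : List Char) (c : Char) (p : Nat) :
    pvOcc cs c p = none ↔ ∀ q, q < p → cs.getD q ' ' ≠ c := by
  induction p with
  | zero => simp [pvOcc]
  | succ p ih =>
    unfold pvOcc
    split
    · constructor
      · intro h; cases h
      · intro h
        exact absurd ‹cs.getD p ' ' = c› (h p (by omega))
    · rw [ih]
      constructor
      · intro h q hq
        rcases Nat.lt_succ_iff_lt_or_eq.mp hq with h' | h'
        · exact h q h'
        · subst h'; assumption
      · intro h q hq; exact h q (by omega)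

theorem pvOcc_eq_some (cs : List Char) (c : Char) (p j : Nat) (h : pvOcc cs c p = some j) :
    cs.getD j ' ' = c ∧ j < p ∧ ∀ q, j < q → q < p → cs.getD q ' ' ≠ c := by
  induction p with
  | zero => cases h
  | succ p ih =>
    unfold pvOcc at h
    split at h
    · cases h
      refine ⟨‹_›, by omega, ?_⟩
      intro q hq hq'; omega
    · obtain ⟨h1, h2, h3⟩ := ih h
      refine ⟨h1, by omega, ?_⟩
      intro q hq hq'
      rcases Nat.lt_succ_iff_lt_or_eq.mp hq' with h' | h'
      · exact h3 q hq h'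
      · subst h'; assumption

theorem pvM_le (cs : List Char) (p : Nat) : pvM cs p ≤ p := by
  induction p with
  | zero => simp [pvM]
  | succ p ih =>
    unfold pvM
    split
    · next j h => have := (pvOcc_eq_some cs _ p j h).2.1; omega
    · omega

-- pvM p ≤ j ↔ the window cs[j:p] is duplicate-free (index form)
theorem pvM_iff (cs : List Char) (p : Nat) :
    ∀ j, j ≤ p → (pvM cs p ≤ j ↔ ∀ a b, j ≤ a → a < b → b < p → cs.getD a ' ' ≠ cs.getD b ' ') := by
  induction p with
  | zero =>
    intro j hj
    constructor
    · intro _ a b ha hab hb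
      omega
    · intro _
      simp [pvM]
  | succ p ih =>
    intro j hj
    rcases Nat.lt_succ_iff_lt_or_eq.mp (Nat.lt_succ_of_le hj) with hj' | hj'
    · -- j ≤ p
      have hjp : j ≤ p := by omega
      unfold pvM
      cases hocc : pvOcc cs (cs.getD p ' ') p with
      | none =>
        have hno := (pvOcc_eq_none cs (cs.getD p ' ') p).mp hocc
        simp only [Nat.max_le]
        constructor
        · rintro ⟨h1, -⟩ a b ha hab hb
          rcases Nat.lt_succ_iff_lt_or_eq.mp hb with hb' | hb'
          · exact (ih j hjp).mp h1 a b ha hab hb'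
          · subst hb'
            intro hc
            exact hno a hab hc
        · intro h
          refine ⟨(ih j hjp).mpr (fun a b ha hab hb => h a b ha hab (by omega)), by omega⟩
      | some j0 =>
        obtain ⟨he, hlt, hmax⟩ := pvOcc_eq_some cs (cs.getD p ' ') p j0 hocc
        simp only [Nat.max_le]
        constructor
        · rintro ⟨h1, h2⟩ a b ha hab hb
          rcases Nat.lt_succ_iff_lt_or_eq.mp hb with hb' | hb'
          · exact (ih j hjp).mp h1 a b ha hab hb'
          · subst hb'
            intro hc
            exact hmax a (by omega) hab (hc.trans he.symm ▸ hc)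
        · intro h
          refine ⟨(ih j hjp).mpr (fun a b ha hab hb => h a b ha hab (by omega)), ?_⟩
          by_contra hc
          exact h j0 p (by omega) hlt (by omega) he
    · -- j = p + 1 : both sides hold
      subst hj'
      constructor
      · intro _ a b ha hab hb
        omega
      · intro _
        have h1 := pvM_le cs (p + 1)
        omega

theorem pvLetter_get? (cs : List Char) (p : Nat) (c : Char) :
    (pvLetter cs p).get? c = (pvOcc cs c p).map (fun j => (j : Int)) := by
  induction p with
  | zero => simp [pvLetter, pvOcc, PySem.Dict.get?_empty]
  | succ p ih =>
    unfold pvLetter pvOcc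
    rw [PySem.Dict.get?_insert]
    by_cases h : cs.getD p ' ' = c
    · rw [if_pos h, if_pos h.symm]; rfl
    · rw [if_neg h, if_neg (fun hc => h hc.symm), ih]

theorem pvLetter_get?_none (cs : List Char) (p : Nat) (c : Char)
    (h : pvOcc cs c p = none) : (pvLetter cs p).get? c = none := by
  rw [pvLetter_get?, h]
  rfl

theorem pvLetter_get?_some (cs : List Char) (p : Nat) (c : Char) (j : Nat)
    (h : pvOcc cs c p = some j) : (pvLetter cs p).get? c = some ((j : Nat) : Int) := by
  rw [pvLetter_get?, h]
  rfl

-- |set(w)| = |w| iff w has no duplicates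
theorem pvSetLen (w : List Char) : (PySem.Set.ofList w).length = w.length ↔ w.Nodup := by
  have hperm : (PySem.Set.ofList w).Perm w.dedup := by
    refine (List.perm_ext_iff_of_nodup (PySem.Set.nodup_ofList w) (List.nodup_dedup w)).mpr ?_
    intro x
    rw [PySem.Set.mem_ofList, List.mem_dedup]
  rw [hperm.length_eq]
  constructor
  · intro h
    have h2 : w.dedup = w := (List.dedup_sublist w).eq_of_length h
    rw [← h2]
    exact List.nodup_dedup w
  · intro h
    rw [List.Nodup.dedup h]

-- Nodup of the window as a condition on indices of cs
theorem pvNodupWin (cs : List Char) (i k' : Nat) (h : i + k' ≤ cs.length) :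
    ((cs.drop i).take k').Nodup ↔
      ∀ a b, i ≤ a → a < b → b < i + k' → cs.getD a ' ' ≠ cs.getD b ' ' := by
  have hlen : ((cs.drop i).take k').length = k' := by
    rw [List.length_take, List.length_drop]; omega
  have hget : ∀ (a : Nat) (ha : a < k'), ((cs.drop i).take k')[a]'(by omega) = cs.getD (i + a) ' ' := by
    intro a ha
    rw [List.getElem_take, List.getElem_drop, List.getD_eq_getElem cs ' ' (by omega)]
  rw [List.Nodup, List.pairwise_iff_getElem]
  constructor
  · intro h a b ha hab hb
    have ha' : a - i < k' := by omega
    have hb' : b - i < k' := by omega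
    have := h (a - i) (b - i) (by omega) (by omega) (by omega)
    rw [hget _ ha', hget _ hb'] at this
    have e1 : i + (a - i) = a := by omega
    have e2 : i + (b - i) = b := by omega
    rw [e1, e2] at this
    exact this
  · intro h a b ha hb hab
    rw [hget a (by omega), hget b (by omega)]
    exact h (i + a) (i + b) (by omega) (by omega) (by omega)

-- A's loop invariant for k ≥ 1
theorem pvFoldA (s : String) (k : Int) (hk : 1 ≤ k) (p : Nat) (hp : p ≤ s.toList.length) :
    (PySem.List.pyRange 0 (p : Int) 1).foldl (pvStepA s k)
        (PySem.Dict.empty, PySem.Set.empty, 0)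
      = (pvLetter s.toList p, PySem.Set.ofList (pvAdds s k p),
         max ((pvM s.toList p : Int)) ((p : Int) + 1 - k)) := by
  induction p with
  | zero =>
    rw [PySem.List.pyRange_one_eq_nil (by omega), List.foldl_nil]
    simp [pvLetter, pvAdds, pvM]
    omega
  | succ p ih =>
    have hp' : p ≤ s.toList.length := by omega
    have hcast : ((p + 1 : Nat) : Int) = (p : Int) + 1 := by push_cast; ring
    rw [hcast, PySem.List.pyRange_one_succ_right (by omega), List.foldl_append, ih hp',
        List.foldl_cons, List.foldl_nil]
    have hk' : ((k.toNat : Nat) : Int) = k := Int.toNat_of_nonneg (by omega)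
    have hgd : (PySem.Str.pyGet? s (p : Int)).getD ' ' = s.toList.getD p ' ' := by
      rw [PySem.Str.pyGet?_natCast, ← List.getD_eq_getElem?_getD]
    have hM1 : pvM s.toList (p + 1)
        = max (pvM s.toList p)
            (match pvOcc s.toList (s.toList.getD p ' ') p with
             | some j => j + 1
             | none => 0) := rfl
    have hstep : pvAdds s k (p + 1) = pvAdds s k p ++
        (if pvM s.toList (p + 1) + k.toNat ≤ p + 1 then
          [PySem.Str.slice s (some ((p : Int) + 1 - k)) (some ((p : Int) + 1))] else []) := by
      unfold pvAdds
      rw [List.range_succ, List.filterMap_append]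
      congr 1
      have hsing : ∀ (f : Nat → Option String) (a : Nat), List.filterMap f [a] = (f a).toList := by
        intro f a
        cases h : f a <;> simp [h]
      rw [hsing]
      by_cases hc : pvM s.toList (p + 1) + k.toNat ≤ p + 1
      · rw [if_pos hc, if_pos hc]; rfl
      · rw [if_neg hc, if_neg hc]; rfl
    have hofl : ∀ (l : List String) (x : String),
        PySem.Set.ofList (l ++ [x]) = PySem.Set.add (PySem.Set.ofList l) x := by
      intro l x
      rw [PySem.Set.ofList_append, PySem.Set.update_cons, PySem.Set.update_nil]
    have hMle : pvM s.toList (p + 1) ≤ p + 1 := pvM_le s.toList (p + 1)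
    cases hocc : pvOcc s.toList (s.toList.getD p ' ') p with
    | none =>
      have hM : pvM s.toList (p + 1) = pvM s.toList p := by
        rw [hM1, hocc]
        simp
      simp only [pvStepA, hgd, pvLetter_get?_none s.toList p _ hocc]
      have hkey : max ((pvM s.toList p : Int)) ((p : Int) + 1 - k)
          = max ((pvM s.toList (p + 1) : Int)) ((p : Int) + 1 - k) := by
        rw [hM]
      rw [hkey]
      by_cases hq : pvM s.toList (p + 1) + k.toNat ≤ p + 1
      · rw [if_pos (by omega), hstep, if_pos hq, hofl]
        simp only [Prod.mk.injEq]
        refine ⟨rfl, ?_, by omega⟩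
        congr 3
        omega
      · rw [if_neg (by omega), hstep, if_neg hq, List.append_nil]
        simp only [Prod.mk.injEq]
        exact ⟨by trivial, by trivial, by omega⟩
    | some j =>
      obtain ⟨-, hjp, -⟩ := pvOcc_eq_some s.toList _ p j hocc
      have hM : pvM s.toList (p + 1) = max (pvM s.toList p) (j + 1) := by
        rw [hM1, hocc]
      simp only [pvStepA, hgd, pvLetter_get?_some s.toList p _ j hocc]
      have hkey : (if max ((pvM s.toList p : Int)) ((p : Int) + 1 - k) ≤ (j : Int) then (j : Int) + 1
          else max ((pvM s.toList p : Int)) ((p : Int) + 1 - k))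
          = max ((pvM s.toList (p + 1) : Int)) ((p : Int) + 1 - k) := by
        rw [hM]
        split_ifs <;> push_cast <;> omega
      rw [hkey]
      by_cases hq : pvM s.toList (p + 1) + k.toNat ≤ p + 1
      · rw [if_pos (by omega), hstep, if_pos hq, hofl]
        simp only [Prod.mk.injEq]
        refine ⟨rfl, ?_, by omega⟩
        congr 3
        omega
      · rw [if_neg (by omega), hstep, if_neg hq, List.append_nil]
        simp only [Prod.mk.injEq]
        exact ⟨by trivial, by trivial, by omega⟩

-- B's loop invariant for k ≥ 1
theorem pvFoldB (s : String) (k : Int) (hk : 1 ≤ k) (p : Nat) (hp : p ≤ s.toList.length) :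
    (PySem.List.pyRange 0 (p : Int) 1).foldl (pvStepB s k) PySem.Set.empty
      = PySem.Set.ofList (pvBAdds s k p) := by
  induction p with
  | zero =>
    rw [PySem.List.pyRange_one_eq_nil (by omega)]
    simp [pvBAdds]
  | succ p ih =>
    have hp' : p ≤ s.toList.length := by omega
    have hcast : ((p + 1 : Nat) : Int) = (p : Int) + 1 := by push_cast; ring
    rw [hcast, PySem.List.pyRange_one_succ_right (by omega), List.foldl_append, ih hp',
        List.foldl_cons, List.foldl_nil]
    have hk' : ((k.toNat : Nat) : Int) = k := Int.toNat_of_nonneg (by omega)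
    have hsub : (PySem.Str.slice s (some (p : Int)) (some ((p : Int) + k))).toList
        = (s.toList.drop p).take k.toNat := by
      rw [← hk']
      simp only [PySem.Str.toList_slice, PySem.Chars.slice_eq_listSlice,
        PySem.List.slice_natCast_add, Int.toNat_natCast]
    have hwl : ((s.toList.drop p).take k.toNat).length = min k.toNat (s.toList.length - p) := by
      rw [List.length_take, List.length_drop]
    have hstep : pvBAdds s k (p + 1) = pvBAdds s k p ++
        (if p + k.toNat ≤ s.toList.length ∧ ((s.toList.drop p).take k.toNat).Nodup then
          [PySem.Str.slice s (some (p : Int)) (some ((p : Int) + k))] else []) := by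
      unfold pvBAdds
      rw [List.range_succ, List.filterMap_append]
      congr 1
      have hsing : ∀ (f : Nat → Option String) (a : Nat), List.filterMap f [a] = (f a).toList := by
        intro f a
        cases h : f a <;> simp [h]
      rw [hsing]
      by_cases hc : p + k.toNat ≤ s.toList.length ∧ ((s.toList.drop p).take k.toNat).Nodup
      · rw [if_pos hc, if_pos hc]; rfl
      · rw [if_neg hc, if_neg hc]; rfl
    have hofl : ∀ (l : List String) (x : String),
        PySem.Set.ofList (l ++ [x]) = PySem.Set.add (PySem.Set.ofList l) x := by
      intro l x
      rw [PySem.Set.ofList_append, PySem.Set.update_cons, PySem.Set.update_nil]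
    unfold pvStepB
    simp only [hsub]
    rw [hstep]
    by_cases hc : p + k.toNat ≤ s.toList.length ∧ ((s.toList.drop p).take k.toNat).Nodup
    · have hwlk : ((s.toList.drop p).take k.toNat).length = k.toNat := by omega
      rw [if_pos ⟨by rw [hwlk]; exact hk', by rw [pvSetLen _ |>.mpr hc.2, hwlk]; exact hk'⟩,
          if_pos hc, hofl]
    · rw [if_neg hc, List.append_nil, if_neg]
      rintro ⟨c1, c2⟩
      have hmin : min k.toNat (s.toList.length - p) = k.toNat := by omega
      have h1 : p + k.toNat ≤ s.toList.length := by omega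
      have hwlk : ((s.toList.drop p).take k.toNat).length = k.toNat := by omega
      have h2 : ((s.toList.drop p).take k.toNat).Nodup := by
        rw [← pvSetLen]
        omega
      exact hc ⟨h1, h2⟩

-- the two add sequences coincide
theorem pvAddsEq (s : String) (k : Int) (hk : 1 ≤ k) :
    pvAdds s k s.toList.length = pvBAdds s k s.toList.length := by
  have hk' : ((k.toNat : Nat) : Int) = k := Int.toNat_of_nonneg (by omega)
  have hcongr : ∀ (l : List Nat) (f g : Nat → Option String),
      (∀ a ∈ l, f a = g a) → l.filterMap f = l.filterMap g := by
    intro l f g h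
    induction l with
    | nil => rfl
    | cons a l ih =>
      rw [List.filterMap_cons, List.filterMap_cons, h a (by simp), ih (fun b hb => h b (by simp [hb]))]
  have hnil : ∀ (l : List Nat) (f : Nat → Option String),
      (∀ a ∈ l, f a = none) → l.filterMap f = [] := by
    intro l f h
    induction l with
    | nil => rfl
    | cons a l ih =>
      rw [List.filterMap_cons, h a (by simp), ih (fun b hb => h b (by simp [hb]))]
  by_cases hkn : k.toNat ≤ s.toList.length
  · -- both sides equal the filterMap over the n-k+1 possible window starts
    have ha : k.toNat - 1 + (s.toList.length - k.toNat + 1) = s.toList.length := by omega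
    have hb : s.toList.length - k.toNat + 1 + (k.toNat - 1) = s.toList.length := by omega
    have hsplitA : List.range s.toList.length
        = List.range (k.toNat - 1)
          ++ (List.range (s.toList.length - k.toNat + 1)).map (fun x => k.toNat - 1 + x) := by
      rw [← List.range_add, ha]
    have hsplitB : List.range s.toList.length
        = List.range (s.toList.length - k.toNat + 1)
          ++ (List.range (k.toNat - 1)).map (fun x => s.toList.length - k.toNat + 1 + x) := by
      rw [← List.range_add, hb]
    unfold pvAdds pvBAdds
    conv_lhs => rw [hsplitA]
    conv_rhs => rw [hsplitB]
    rw [List.filterMap_append, List.filterMap_append, List.filterMap_map, List.filterMap_map]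
    rw [hnil (List.range (k.toNat - 1)) _ (fun q hq => by
      have hq' : q < k.toNat - 1 := List.mem_range.mp hq
      have := pvM_le s.toList (q + 1)
      rw [if_neg (by omega)]), List.nil_append]
    rw [hnil (List.range (k.toNat - 1)) _ (fun x hx => by
        have hx' : x < k.toNat - 1 := List.mem_range.mp hx
        simp only [Function.comp]
        rw [if_neg]
        rintro ⟨c1, -⟩
        omega), List.append_nil]
    refine hcongr _ _ _ (fun i hi => ?_)
    have hi' : i < s.toList.length - k.toNat + 1 := List.mem_range.mp hi
    simp only [Function.comp]
    have e1 : k.toNat - 1 + i + 1 = i + k.toNat := by omega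
    rw [e1]
    have hwin : (pvM s.toList (i + k.toNat) + k.toNat ≤ i + k.toNat)
        ↔ ((s.toList.drop i).take k.toNat).Nodup := by
      rw [pvNodupWin s.toList i k.toNat (by omega)]
      have hmi := pvM_iff s.toList (i + k.toNat) i (by omega)
      constructor
      · intro h
        exact hmi.mp (by omega)
      · intro h
        have := hmi.mpr h
        omega
    have e2 : ((k.toNat - 1 + i : Nat) : Int) + 1 - k = (i : Nat) := by push_cast; omega
    have e3 : ((k.toNat - 1 + i : Nat) : Int) + 1 = (i : Nat) + k := by push_cast; omega
    by_cases hc : pvM s.toList (i + k.toNat) + k.toNat ≤ i + k.toNat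
    · rw [if_pos hc, if_pos ⟨by omega, hwin.mp hc⟩, e2, e3]
    · rw [if_neg hc, if_neg (fun h => hc (hwin.mpr h.2))]
  · -- k > len(s): no window fits, both sides are empty
    unfold pvAdds pvBAdds
    rw [hnil, hnil]
    · intro i hi
      rw [if_neg]
      rintro ⟨c1, -⟩
      omega
    · intro q hq
      have hq' : q < s.toList.length := List.mem_range.mp hq
      have := pvM_le s.toList (q + 1)
      rw [if_neg (by omega)]

-- k < 0: A never adds anything
theorem pvFoldA_neg (s : String) (k : Int) (hk : k < 0) (p : Nat) :
    ∃ start,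
      (PySem.List.pyRange 0 (p : Int) 1).foldl (pvStepA s k)
          (PySem.Dict.empty, PySem.Set.empty, 0) = (pvLetter s.toList p, PySem.Set.empty, start)
        ∧ 0 ≤ start ∧ start ≤ (p : Int) := by
  induction p with
  | zero =>
    refine ⟨0, ?_, by omega, by omega⟩
    rw [PySem.List.pyRange_one_eq_nil (by omega), List.foldl_nil]
    rfl
  | succ p ih =>
    obtain ⟨start, heq, h0, h1⟩ := ih
    have hcast : ((p + 1 : Nat) : Int) = (p : Int) + 1 := by push_cast; ring
    rw [hcast, PySem.List.pyRange_one_succ_right (by omega), List.foldl_append, heq,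
        List.foldl_cons, List.foldl_nil]
    have hgd : (PySem.Str.pyGet? s (p : Int)).getD ' ' = s.toList.getD p ' ' := by
      rw [PySem.Str.pyGet?_natCast, ← List.getD_eq_getElem?_getD]
    cases hocc : pvOcc s.toList (s.toList.getD p ' ') p with
    | none =>
      simp only [pvStepA, hgd, pvLetter_get?_none s.toList p _ hocc]
      rw [if_neg (by omega)]
      exact ⟨start, rfl, h0, by omega⟩
    | some j =>
      obtain ⟨-, hjp, -⟩ := pvOcc_eq_some s.toList _ p j hocc
      simp only [pvStepA, hgd, pvLetter_get?_some s.toList p _ j hocc]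
      by_cases hss : start ≤ (j : Int)
      · rw [if_pos hss, if_neg (by omega)]
        exact ⟨(j : Int) + 1, rfl, by omega, by omega⟩
      · rw [if_neg hss, if_neg (by omega)]
        exact ⟨start, rfl, h0, by omega⟩

-- k < 0: B never adds anything
theorem pvFoldB_neg (s : String) (k : Int) (hk : k < 0) (l : List Int) (acc : PySem.Set String) :
    l.foldl (pvStepB s k) acc = acc := by
  induction l generalizing acc with
  | nil => rfl
  | cons i l ih =>
    rw [List.foldl_cons, ih]
    unfold pvStepB
    rw [if_neg]
    rintro ⟨h1, -⟩
    omega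

-- ===== VERDICT (by name: the statement is the Claim_ definition above) =====
theorem substringK_spec : Claim_equal_substringK := by
  intro s k _
  unfold Spec_substringK substringK substringK_alt
  by_cases h0 : s.toList.length = 0 ∨ k = 0
  · rw [if_pos h0, if_pos h0]
  · rw [if_neg h0, if_neg h0]
    rcases Int.lt_or_le k 0 with hneg | hpos
    · obtain ⟨start, heq, -⟩ := pvFoldA_neg s k hneg s.toList.length
      rw [heq, pvFoldB_neg s k hneg]
    · have hk : 1 ≤ k := by
        rcases h0 with h0
        push Not at h0
        omega
      rw [pvFoldA s k hk s.toList.length le_rfl, pvFoldB s k hk s.toList.length le_rfl]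
      simp only
      rw [pvAddsEq s k hk]
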